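-- pv_equiv track=rewrite | github.com/PascalGuenther/adventOfCode_2023 | python/day04.py | part2
-- ===== SOURCE A (Python) =====
-- def part2(cards):
--     instances = [1] * len(cards)
--     for i, card in enumerate(cards):
--         matches = card[0].intersection(card[1])
--         numMatches = len(matches)
--         for j in range (i + 1, numMatches + i + 1):
--             if j >= len(instances):
--                 break
--             instances[j] += instances[i]
--     return sum(instances)
-- ===== SOURCE B (Python) =====
-- def part2(cards):
--     # Difference array + running carry: two point updates per card
--     # instead of an inner loop over the match range.
--     n = len(cards)
--     diff = [0] * (n + 1)
--     total = 0
--     carry = 0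
--     for i, card in enumerate(cards):
--         carry += diff[i]
--         copies = 1 + carry
--         total += copies
--         m = len(card[0] & card[1])
--         hi = min(i + 1 + m, n)
--         diff[i + 1] += copies
--         diff[hi] -= copies
--     return total
-- ===== Notes on version B (the rewrite author's own statement) =====
-- stated objective: alternative
-- what changed: A propagates each card's copies with an inner loop adding to every one of the next `matches` slots; B replaces that propagation by a difference array with a running carry, doing two point updates per card.
import Mathlib
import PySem

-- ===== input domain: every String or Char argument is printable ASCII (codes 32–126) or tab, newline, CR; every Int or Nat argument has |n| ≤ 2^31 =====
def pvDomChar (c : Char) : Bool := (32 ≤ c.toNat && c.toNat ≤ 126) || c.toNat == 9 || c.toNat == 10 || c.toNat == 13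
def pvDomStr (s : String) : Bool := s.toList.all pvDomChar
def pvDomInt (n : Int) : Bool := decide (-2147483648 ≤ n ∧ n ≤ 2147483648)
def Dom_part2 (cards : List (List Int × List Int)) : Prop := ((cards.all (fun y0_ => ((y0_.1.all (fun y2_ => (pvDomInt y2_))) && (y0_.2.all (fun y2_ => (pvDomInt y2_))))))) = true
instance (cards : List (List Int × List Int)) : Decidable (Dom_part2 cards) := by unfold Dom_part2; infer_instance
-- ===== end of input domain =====

-- B replaces A's per-card inner propagation loop by a difference array with a running carry (two point updates per card).

-- ===== PORT A =====
-- len(card[0].intersection(card[1])) — number of distinct common elements (used verbatim by both Pythons)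
def pvMatches (card : List Int × List Int) : Int :=
  PySem.Set.len (PySem.Set.inter (PySem.Set.ofList card.1) card.2)

-- the inner 'for j in range(i+1, numMatches+i+1): if j >= len(instances): break; instances[j] += instances[i]'
def innerA (inst : List Int) (i j stop : Int) : List Int :=
  if _h : stop ≤ j then inst
  else if (inst.length : Int) ≤ j then inst  -- break
  else innerA (PySem.List.pySetD inst j (PySem.List.pyGetD inst j 0 + PySem.List.pyGetD inst i 0)) i (j + 1) stop
termination_by (stop - j).toNat
decreasing_by omega

-- the body of 'for i, card in enumerate(cards): …'
def stepA (inst : List Int) (ic : Int × (List Int × List Int)) : List Int :=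
  let numMatches : Int := pvMatches ic.2
  innerA inst ic.1 (ic.1 + 1) (numMatches + ic.1 + 1)

def part2 (cards : List (List Int × List Int)) : Int :=
  let instances : List Int := List.replicate cards.length 1
  let instances := (PySem.List.enumerate cards).foldl stepA instances
  instances.sum

-- ===== PORT B =====
-- one step of B's loop body; state = (diff, total, carry)
def stepB (n : Nat) (st : List Int × Int × Int) (ic : Int × (List Int × List Int)) : List Int × Int × Int :=
  let carry := st.2.2 + PySem.List.pyGetD st.1 ic.1 0
  let copies := 1 + carry
  let total := st.2.1 + copies
  let m := pvMatches ic.2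
  let hi := min (ic.1 + 1 + m) (n : Int)
  let diff := PySem.List.pySetD st.1 (ic.1 + 1) (PySem.List.pyGetD st.1 (ic.1 + 1) 0 + copies)
  let diff := PySem.List.pySetD diff hi (PySem.List.pyGetD diff hi 0 - copies)
  (diff, total, carry)

def part2_alt (cards : List (List Int × List Int)) : Int :=
  let n := cards.length
  let st := (PySem.List.enumerate cards).foldl (stepB n) (List.replicate (n + 1) 0, 0, 0)
  st.2.1

-- ===== PRECONDITION & SPEC =====
def Spec_part2 (cards : List (List Int × List Int)) (out : Int) : Prop := out = part2_alt cards
instance (cards : List (List Int × List Int)) (out : Int) : Decidable (Spec_part2 cards out) := by unfold Spec_part2; infer_instance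

-- ===== CLAIM (what is proved, stated in full; the proofs are below) =====
def Claim_equal_part2 : Prop := ∀ (cards : List (List Int × List Int)), Dom_part2 cards → Spec_part2 cards (part2 cards)

-- ===== LEMMAS AND PROOFS =====

def segS (d : List Int) (a b : Nat) : Int := ((List.range b).map (fun t => d.getD (a + t) 0)).sum

lemma getD_set_eq (l : List Int) (p t : Nat) (v : Int) :
    (l.set p v).getD t 0 = if t = p ∧ p < l.length then v else l.getD t 0 := by
  simp [List.getD_eq_getElem?_getD, List.getElem?_set]
  split_ifs <;> simp_all

lemma sum_indicator (a p : Nat) (c : Int) : ∀ (b : Nat),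
    ((List.range b).map (fun t => if a + t = p then c else 0)).sum
      = if a ≤ p ∧ p < a + b then c else 0 := by
  intro b
  induction b with
  | zero =>
    simp only [List.range_zero, List.map_nil, List.sum_nil]
    split_ifs <;> omega
  | succ b ih =>
    rw [List.range_succ, List.map_append, List.sum_append, ih]
    simp
    split_ifs <;> omega

lemma sum_getD (l : List Int) : l.sum = ((List.range l.length).map (fun t => l.getD t 0)).sum := by
  induction l with
  | nil => simp
  | cons x xs ih =>
    rw [List.length_cons, List.range_succ_eq_map]
    simp [List.map_map, Function.comp_def, ih]

lemma segS_succ (d : List Int) (a b : Nat) : segS d a (b + 1) = d.getD a 0 + segS d (a + 1) b := by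
  unfold segS
  rw [List.range_succ_eq_map]
  simp [List.map_map, Function.comp_def, Nat.add_comm, Nat.add_left_comm]

lemma pvMatches_nonneg (c : List Int × List Int) : 0 ≤ pvMatches c := by
  simp [pvMatches, PySem.Set.len]

lemma innerA_length (inst : List Int) (i j stop : Int) : (innerA inst i j stop).length = inst.length := by
  fun_induction innerA inst i j stop with
  | case1 => rfl
  | case2 => rfl
  | case3 inst j _h1 _h2 ih => rw [ih, PySem.List.length_pySetD]

lemma innerA_getD (inst : List Int) (i j stop : Int) (hi0 : 0 ≤ i) (hij : i < j) (t : Nat) :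
    (innerA inst i j stop).getD t 0 = inst.getD t 0 +
      (if j ≤ (t : Int) ∧ (t : Int) < min stop (inst.length : Int)
        then PySem.List.pyGetD inst i 0 else 0) := by
  obtain ⟨iN, rfl⟩ : ∃ iN : Nat, i = (iN : Int) := ⟨i.toNat, by omega⟩
  clear hi0
  fun_induction innerA inst (iN : Int) j stop with
  | case1 inst j h1 =>
    rw [if_neg (by omega), add_zero]
  | case2 inst j h1 h2 =>
    rw [if_neg (by omega), add_zero]
  | case3 inst j h1 h2 ih =>
    obtain ⟨jN, rfl⟩ : ∃ jN : Nat, j = (jN : Int) := ⟨j.toNat, by omega⟩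
    have hjlen : jN < inst.length := by exact_mod_cast not_le.mp h2
    have hiN : iN < jN := by exact_mod_cast hij
    rw [ih (by exact_mod_cast Nat.lt_succ_of_lt hiN)]
    rw [PySem.List.pySetD_natCast, PySem.List.pyGetD_natCast, PySem.List.pyGetD_natCast,
        PySem.List.pyGetD_natCast]
    simp only [getD_set_eq, List.length_set]
    simp only [lt_min_iff]
    rcases eq_or_ne t jN with rfl | hne <;> split_ifs <;> omega

lemma main_inv (n : Nat) : ∀ (cs : List (List Int × List Int)) (k : Nat)
    (inst diff : List Int) (total carry : Int),
    k + cs.length = n → inst.length = n → diff.length = n + 1 →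
    total = ((List.range k).map (fun t => inst.getD t 0)).sum →
    (∀ j : Nat, k ≤ j → j < n → inst.getD j 0 = 1 + carry + segS diff k (j + 1 - k)) →
    ((PySem.List.enumerate cs (k : Int)).foldl stepA inst).sum
      = ((PySem.List.enumerate cs (k : Int)).foldl (stepB n) (diff, total, carry)).2.1 := by
  intro cs
  induction cs with
  | nil =>
    intro k inst diff total carry hk hinst hdiff htot H2
    have hkn : k = n := by simpa using hk
    subst hkn
    simp only [PySem.List.enumerate, List.foldl_nil]
    rw [sum_getD, hinst]
    exact htot.symm
  | cons c rest ih =>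
    intro k inst diff total carry hk hinst hdiff htot H2
    rw [PySem.List.enumerate_cons, List.foldl_cons, List.foldl_cons]
    obtain ⟨mN, hmN⟩ : ∃ mN : Nat, pvMatches c = (mN : Int) :=
      ⟨(pvMatches c).toNat, by have := pvMatches_nonneg c; omega⟩
    have hkn : k < n := by simp at hk; omega
    obtain ⟨hiN, hhiN⟩ : ∃ x : Nat, x = min (k + 1 + mN) n := ⟨_, rfl⟩
    have hcopies : inst.getD k 0 = 1 + carry + diff.getD k 0 := by
      have h := H2 k le_rfl hkn
      simpa [segS] using h
    have hgd : PySem.List.pyGetD diff ((k : Nat) : Int) 0 = diff.getD k 0 :=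
      PySem.List.pyGetD_natCast diff k 0
    have hcast : ((k : Nat) : Int) + 1 = (((k + 1 : Nat)) : Int) := by push_cast; ring
    have hmin : min ((((k + 1 : Nat)) : Int) + pvMatches c) ((n : Nat) : Int) = ((hiN : Nat) : Int) := by
      rw [hmN]; push_cast; omega
    -- the updated difference array, written out
    have hB : stepB n (diff, total, carry) (((k : Nat) : Int), c) =
        ((diff.set (k+1) (diff.getD (k+1) 0 + (1 + (carry + diff.getD k 0)))).set hiN
           ((diff.set (k+1) (diff.getD (k+1) 0 + (1 + (carry + diff.getD k 0)))).getD hiN 0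
             - (1 + (carry + diff.getD k 0))),
         total + (1 + (carry + diff.getD k 0)),
         carry + diff.getD k 0) := by
      simp only [stepB]
      rw [hgd, hcast, hmin, PySem.List.pySetD_natCast, PySem.List.pyGetD_natCast,
          PySem.List.pySetD_natCast, PySem.List.pyGetD_natCast]
    have hA : stepA inst (((k : Nat) : Int), c) =
        innerA inst ((k : Nat) : Int) (((k : Nat) : Int) + 1) (pvMatches c + ((k : Nat) : Int) + 1) := rfl
    rw [hA, hB, hcast]
    -- pointwise description of A's updated instances
    have hinstL : (innerA inst ((k : Nat) : Int) (((k+1 : Nat)) : Int) (pvMatches c + ((k : Nat) : Int) + 1)).length = inst.length :=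
      innerA_length _ _ _ _
    have hinst' : ∀ t : Nat,
        (innerA inst ((k : Nat) : Int) (((k+1 : Nat)) : Int) (pvMatches c + ((k : Nat) : Int) + 1)).getD t 0
          = inst.getD t 0 + (if k + 1 ≤ t ∧ t < hiN then inst.getD k 0 else 0) := by
      intro t
      rw [innerA_getD inst _ _ _ (by positivity) (by push_cast; omega) t, PySem.List.pyGetD_natCast]
      by_cases h : k + 1 ≤ t ∧ t < hiN
      · rw [if_pos (by rw [hinst, hmN]; push_cast; omega), if_pos h]
      · rw [if_neg (by rw [hinst, hmN]; push_cast; omega), if_neg h]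
    apply ih (k+1)
    · simp at hk ⊢; omega
    · rw [hinstL, hinst]
    · simp [List.length_set, hdiff]
    · -- total invariant
      rw [List.range_succ, List.map_append, List.sum_append]
      have hfix : ∀ t ∈ List.range k,
          (innerA inst ((k : Nat) : Int) (((k+1 : Nat)) : Int) (pvMatches c + ((k : Nat) : Int) + 1)).getD t 0
            = inst.getD t 0 := by
        intro t ht
        simp only [List.mem_range] at ht
        rw [hinst', if_neg (by omega), add_zero]
      rw [List.map_congr_left hfix, ← htot]
      simp only [List.map_cons, List.map_nil, List.sum_cons, List.sum_nil]
      rw [hinst' k, if_neg (by omega), add_zero, hcopies]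
      ring
    · -- H2 invariant
      intro j hj1 hj2
      have hd' : ∀ s : Nat, s ≤ n →
          ((diff.set (k+1) (diff.getD (k+1) 0 + (1 + (carry + diff.getD k 0)))).set hiN
             ((diff.set (k+1) (diff.getD (k+1) 0 + (1 + (carry + diff.getD k 0)))).getD hiN 0
               - (1 + (carry + diff.getD k 0)))).getD s 0
            = diff.getD s 0 + ((if s = k+1 then (1 + (carry + diff.getD k 0)) else 0)
                + (if s = hiN then -(1 + (carry + diff.getD k 0)) else 0)) := by
        intro s hs
        have hk1 : k + 1 < diff.length := by omega
        have hhi : hiN < diff.length := by omega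
        simp only [getD_set_eq, List.length_set, and_iff_left hk1, and_iff_left hhi]
        split_ifs <;> subst_vars <;> omega
      have hseg : segS ((diff.set (k+1) (diff.getD (k+1) 0 + (1 + (carry + diff.getD k 0)))).set hiN
             ((diff.set (k+1) (diff.getD (k+1) 0 + (1 + (carry + diff.getD k 0)))).getD hiN 0
               - (1 + (carry + diff.getD k 0)))) (k+1) (j - k)
          = segS diff (k+1) (j - k)
            + ((if k+1 ≤ k+1 ∧ k+1 < k+1 + (j-k) then (1 + (carry + diff.getD k 0)) else 0)
              + (if k+1 ≤ hiN ∧ hiN < k+1 + (j-k) then -(1 + (carry + diff.getD k 0)) else 0)) := by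
        unfold segS
        rw [List.map_congr_left (fun t ht => by
          simp only [List.mem_range] at ht
          exact hd' (k+1+t) (by omega))]
        rw [PySem.List.sum_map_add_int, PySem.List.sum_map_add_int, sum_indicator, sum_indicator]
      have hjk : j + 1 - (k + 1) = j - k := by omega
      have hjk2 : j + 1 - k = (j - k) + 1 := by omega
      have hH2j := H2 j (by omega) hj2
      rw [hjk2, segS_succ] at hH2j
      rw [hinst' j, hjk, hseg, hH2j]
      have hge : k + 1 ≤ hiN := by omega
      split_ifs <;> omega

-- ===== VERDICT (by name: the statement is the Claim_ definition above) =====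
theorem part2_spec : Claim_equal_part2 := by
  intro cards _
  unfold Spec_part2 part2 part2_alt
  exact main_inv cards.length cards 0 _ _ _ _ (by simp) (by simp) (by simp) (by simp)
    (by intro j _ hj; simp [segS, hj])
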